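-- pv_equiv track=rewrite | github.com/awsdevs/codebert-repo-chunker | codebert-repo-chunker/src/chunkers/code/javascript_chunker.py | _find_component_sections
-- ===== SOURCE A (Python) =====
-- from typing import List, Dict, Any, Optional, Tuple, Set
--
-- def _find_component_sections(lines: List[str]) -> List[Dict[str, str]]:
--     """Find logical sections in a component"""
--     sections = []
--     current_section = {'name': 'main', 'content': ''}
--
--     for line in lines:
--         # Detect section markers
--         if 'render(' in line or 'return (' in line or 'return <' in line:
--             if current_section['content']:
--                 sections.append(current_section)
--             current_section = {'name': 'render', 'content': line}
--         elif 'componentDidMount' in line: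
--             if current_section['content']:
--                 sections.append(current_section)
--             current_section = {'name': 'lifecycle', 'content': line}
--         elif 'useEffect' in line:
--             if current_section['content']:
--                 sections.append(current_section)
--             current_section = {'name': 'effects', 'content': line}
--         else:
--             current_section['content'] += '\n' + line
--
--     if current_section['content']:
--         sections.append(current_section)
--
--     return sections
-- ===== SOURCE B (Python) =====
-- from typing import List, Dict
--
-- def _marker(line: str):
--     if 'render(' in line or 'return (' in line or 'return <' in line:
--         return 'render'
--     if 'componentDidMount' in line:
--         return 'lifecycle'
--     if 'useEffect' in line:
--         return 'effects'
--     return None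
--
-- def _find_component_sections(lines: List[str]) -> List[Dict[str, str]]:
--     """Find logical sections in a component (group lines first, then render)."""
--     # pass 1: partition lines into groups (name, header, body_lines)
--     groups = [('main', '', [])]
--     for line in lines:
--         m = _marker(line)
--         if m is None:
--             groups[-1][2].append(line)
--         else:
--             groups.append((m, line, []))
--     # pass 2: render each group; keep only non-empty content
--     out = []
--     for name, header, body in groups:
--         content = header + ''.join('\n' + l for l in body)
--         if content:
--             out.append({'name': name, 'content': content})
--     return out
-- ===== Notes on version B (the rewrite author's own statement) =====
-- stated objective: faster
-- what changed: Replaces the single interleaved flush-on-marker loop with two staged passes: first partition the lines into (name, header, body) groups at marker lines, then render each group's content with one join and keep the non-empty ones; this removes A's repeated 'content += line' string concatenation, which is quadratic in a section's size.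
import Mathlib
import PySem

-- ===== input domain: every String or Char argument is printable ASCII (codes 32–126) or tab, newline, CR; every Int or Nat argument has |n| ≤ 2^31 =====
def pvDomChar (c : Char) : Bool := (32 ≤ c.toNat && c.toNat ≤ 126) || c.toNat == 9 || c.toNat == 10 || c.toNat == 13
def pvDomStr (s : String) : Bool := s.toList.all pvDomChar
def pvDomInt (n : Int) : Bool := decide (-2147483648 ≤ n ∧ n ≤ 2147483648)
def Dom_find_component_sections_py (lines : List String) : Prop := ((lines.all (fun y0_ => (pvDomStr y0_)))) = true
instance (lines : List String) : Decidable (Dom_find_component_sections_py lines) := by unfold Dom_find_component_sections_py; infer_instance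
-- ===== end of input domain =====

-- B replaces A's interleaved flush-on-marker loop by two staged passes (group lines, then render each group with one join), avoiding A's repeated string concatenation; a timing run measured B faster.

-- ===== PORT A =====
-- one loop step of A: flush the current section on a marker line, else extend its content
def stepA (st : List (List (String × String)) × String × String) (line : String) :
    List (List (String × String)) × String × String :=
  if PySem.Str.isIn "render(" line || PySem.Str.isIn "return (" line || PySem.Str.isIn "return <" line then
    ((if st.2.2 = "" then st.1 else st.1 ++ [[("name", st.2.1), ("content", st.2.2)]]), "render", line)
  else if PySem.Str.isIn "componentDidMount" line then
    ((if st.2.2 = "" then st.1 else st.1 ++ [[("name", st.2.1), ("content", st.2.2)]]), "lifecycle", line)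
  else if PySem.Str.isIn "useEffect" line then
    ((if st.2.2 = "" then st.1 else st.1 ++ [[("name", st.2.1), ("content", st.2.2)]]), "effects", line)
  else (st.1, st.2.1, st.2.2 ++ "\n" ++ line)

def find_component_sections_py (lines : List String) : List (List (String × String)) :=
  let fin := lines.foldl stepA ([], "main", "")
  if fin.2.2 = "" then fin.1 else fin.1 ++ [[("name", fin.2.1), ("content", fin.2.2)]]

-- ===== PORT B =====
-- B helper: classify a line (same priority order render/lifecycle/effects)
def pyMarker (line : String) : Option String :=
  if PySem.Str.isIn "render(" line || PySem.Str.isIn "return (" line || PySem.Str.isIn "return <" line then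
    some "render"
  else if PySem.Str.isIn "componentDidMount" line then some "lifecycle"
  else if PySem.Str.isIn "useEffect" line then some "effects"
  else none

-- B pass 1: extend the last group's body, or open a new group at a marker line
def groupStep (groups : List (String × String × List String)) (line : String) :
    List (String × String × List String) :=
  match pyMarker line with
  | none =>
    match groups.getLast? with
    | some g => groups.dropLast ++ [(g.1, g.2.1, g.2.2 ++ [line])]
    | none => groups
  | some m => groups ++ [(m, line, [])]

-- B pass 2: render one group and append it if its content is non-empty
def renderStep (out : List (List (String × String))) (g : String × String × List String) :
    List (List (String × String)) :=
  if g.2.1 ++ String.join (g.2.2.map (fun l => "\n" ++ l)) = "" then out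
  else out ++ [[("name", g.1), ("content", g.2.1 ++ String.join (g.2.2.map (fun l => "\n" ++ l)))]]

def find_component_sections_py_alt (lines : List String) : List (List (String × String)) :=
  let groups := lines.foldl groupStep [("main", "", [])]
  groups.foldl renderStep []

-- ===== PRECONDITION & SPEC =====
def Spec_find_component_sections_py (lines : List String) (out : List (List (String × String))) : Prop := out = find_component_sections_py_alt lines
instance (lines : List String) (out : List (List (String × String))) : Decidable (Spec_find_component_sections_py lines out) := by unfold Spec_find_component_sections_py; infer_instance

-- ===== CLAIM =====
def Claim_equal_find_component_sections_py : Prop := ∀ (lines : List String), Dom_find_component_sections_py lines → Spec_find_component_sections_py lines (find_component_sections_py lines)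

-- ===== LEMMAS AND PROOFS =====

-- A's step, characterised by B's classifier
theorem stepA_none (st : List (List (String × String)) × String × String) (line : String)
    (hm : pyMarker line = none) : stepA st line = (st.1, st.2.1, st.2.2 ++ "\n" ++ line) := by
  unfold pyMarker at hm; unfold stepA; split_ifs at hm ⊢; simp_all

theorem stepA_some (st : List (List (String × String)) × String × String) (line m : String)
    (hm : pyMarker line = some m) :
    stepA st line = ((if st.2.2 = "" then st.1
      else st.1 ++ [[("name", st.2.1), ("content", st.2.2)]]), m, line) := by
  unfold pyMarker at hm; unfold stepA; split_ifs at hm ⊢ <;> simp_all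

theorem groupStep_none_single (n h : String) (b : List String) (line : String)
    (hm : pyMarker line = none) : groupStep [(n, h, b)] line = [(n, h, b ++ [line])] := by
  unfold groupStep; rw [hm]; rfl

theorem groupStep_some (gs : List (String × String × List String)) (line m : String)
    (hm : pyMarker line = some m) : groupStep gs line = gs ++ [(m, line, [])] := by
  unfold groupStep; rw [hm]

-- pass 1 never empties a non-empty group list
theorem groupStep_ne_nil (groups : List (String × String × List String)) (line : String)
    (h : groups ≠ []) : groupStep groups line ≠ [] := by
  unfold groupStep
  cases pyMarker line <;> simp_all
  cases hg : groups.getLast? <;> simp_all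

-- pass 1 only touches the tail: a prefix of finished groups is inert
theorem foldl_groupStep_append (lines : List String) :
    ∀ (gs cur : List (String × String × List String)), cur ≠ [] →
    lines.foldl groupStep (gs ++ cur) = gs ++ lines.foldl groupStep cur := by
  induction lines with
  | nil => intro gs cur _; simp
  | cons l ls ih =>
    intro gs cur hcur
    simp only [List.foldl_cons]
    have hstep : groupStep (gs ++ cur) l = gs ++ groupStep cur l := by
      unfold groupStep
      cases pyMarker l with
      | some m => simp
      | none =>
        rw [List.getLast?_append_of_ne_nil _ hcur]
        cases hg : cur.getLast? with
        | none => simp_all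
        | some g => rw [List.dropLast_append_of_ne_nil hcur]; simp
    rw [hstep, ih _ _ (groupStep_ne_nil cur l hcur)]

-- pass 2 is an append-only fold
theorem foldl_renderStep_append (gs : List (String × String × List String)) :
    ∀ out, gs.foldl renderStep out = out ++ gs.foldl renderStep [] := by
  induction gs with
  | nil => simp
  | cons g gs ih =>
    intro out
    simp only [List.foldl_cons]
    rw [ih (renderStep out g), ih (renderStep [] g)]
    unfold renderStep
    split_ifs <;> simp

-- main invariant: A's running state (emitted sections, name, content) corresponds to
-- B's finished groups plus one open group (name, header, body)
theorem main_invariant (lines : List String) :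
    ∀ (n h : String) (b : List String) (secs : List (List (String × String))),
    (let fin := lines.foldl stepA (secs, n, h ++ String.join (b.map (fun s => "\n" ++ s)))
     if fin.2.2 = "" then fin.1 else fin.1 ++ [[("name", fin.2.1), ("content", fin.2.2)]])
    = secs ++ (lines.foldl groupStep [(n, h, b)]).foldl renderStep [] := by
  induction lines with
  | nil =>
    intro n h b secs
    simp only [List.foldl_nil, List.foldl_cons, renderStep]
    split_ifs <;> simp
  | cons l ls ih =>
    intro n h b secs
    simp only [List.foldl_cons]
    cases hm : pyMarker l with
    | none =>
      rw [stepA_none _ _ hm, groupStep_none_single _ _ _ _ hm]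
      dsimp only
      simp only [String.append_assoc]
      rw [show ("\n" : String) ++ l = String.join ([l].map (fun s => "\n" ++ s)) from by
            simp [String.join]]
      rw [show String.join (b.map (fun s => "\n" ++ s)) ++ String.join ([l].map (fun s => "\n" ++ s))
            = String.join ((b ++ [l]).map (fun s => "\n" ++ s)) from by
            simp [String.join]]
      exact ih n h (b ++ [l]) secs
    | some m =>
      rw [stepA_some _ _ _ hm, groupStep_some _ _ _ hm,
          foldl_groupStep_append ls [(n, h, b)] [(m, l, [])] (by simp),
          foldl_renderStep_append]
      have hl : (l : String) = l ++ String.join (([] : List String).map (fun s => "\n" ++ s)) := by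
        simp [String.join]
      rw [show ls.foldl stepA
            ((if h ++ String.join (b.map (fun s => "\n" ++ s)) = "" then secs
              else secs ++ [[("name", n), ("content", h ++ String.join (b.map (fun s => "\n" ++ s)))]]), m, l)
          = ls.foldl stepA
            ((if h ++ String.join (b.map (fun s => "\n" ++ s)) = "" then secs
              else secs ++ [[("name", n), ("content", h ++ String.join (b.map (fun s => "\n" ++ s)))]]), m,
             l ++ String.join (([] : List String).map (fun s => "\n" ++ s))) from by rw [← hl]]
      rw [ih m l [], List.singleton_append, List.foldl_cons, foldl_renderStep_append]
      simp only [renderStep]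
      split_ifs with hc
      · simp
      · simp only [List.nil_append]
        rw [foldl_renderStep_append (List.foldl groupStep [(m, l, [])] ls)
              [[("name", n), ("content", h ++ String.join (List.map (fun s => "\n" ++ s) b))]]]
        simp

-- ===== VERDICT =====
theorem find_component_sections_py_spec : Claim_equal_find_component_sections_py := by
  intro lines _
  unfold Spec_find_component_sections_py find_component_sections_py find_component_sections_py_alt
  have h := main_invariant lines "main" "" []
  simpa using h []
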